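-- pv_equiv track=rewrite | github.com/lvaughn/advent | 2016/13/cubes.py | is_wall
-- ===== SOURCE A (Python) =====
-- PUZZLE_INPUT = 1358
--
-- wall_cache = {}
--
-- def is_wall(x, y):
--     key = (x, y)
--     if key not in wall_cache:
--         val = x * x + 3 * x + 2 * x * y + y + y * y + PUZZLE_INPUT
--         ones = 0
--         while val > 0:
--             if val % 2 == 1:
--                 ones += 1
--             val = val // 2
--         wall_cache[key] = ones % 2 == 1
--     return wall_cache[key]
-- ===== SOURCE B (Python) =====
-- PUZZLE_INPUT = 1358
--
-- wall_cache = {}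
--
-- def is_wall(x, y):
--     key = (x, y)
--     if key not in wall_cache:
--         val = x * x + 3 * x + 2 * x * y + y + y * y + PUZZLE_INPUT
--         if val <= 0:
--             wall_cache[key] = False
--         else:
--             s = 1
--             while s < val.bit_length():
--                 val ^= val >> s
--                 s *= 2
--             wall_cache[key] = val & 1 == 1
--     return wall_cache[key]
-- ===== Notes on version B (the rewrite author's own statement) =====
-- stated objective: alternative
-- what changed: replaced the linear per-bit popcount loop with a divide-and-conquer XOR parity fold (val ^= val >> s with s doubling), so all bits are reduced pairwise in O(log bits) xor steps and the parity is read off the lowest bit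
import Mathlib
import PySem

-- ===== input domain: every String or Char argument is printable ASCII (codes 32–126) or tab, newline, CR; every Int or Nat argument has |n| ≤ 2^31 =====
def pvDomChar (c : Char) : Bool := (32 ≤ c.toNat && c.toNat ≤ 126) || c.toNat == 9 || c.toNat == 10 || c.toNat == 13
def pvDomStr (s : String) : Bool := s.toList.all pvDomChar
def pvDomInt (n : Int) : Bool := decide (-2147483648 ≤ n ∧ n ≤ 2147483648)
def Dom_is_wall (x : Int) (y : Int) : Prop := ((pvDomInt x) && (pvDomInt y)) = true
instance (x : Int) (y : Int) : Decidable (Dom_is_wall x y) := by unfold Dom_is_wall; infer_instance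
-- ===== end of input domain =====

-- B replaces A's linear per-bit popcount loop by a doubling XOR parity fold; the proof is about the
-- RETURN value (both Pythons also memoise results in a module-level dict, a side effect not modelled).

-- ===== PORT A =====
-- A's `while val > 0` popcount loop, carrying the accumulator `ones`
def isWallOnes (val : Int) (ones : Int) : Int :=
  if 0 < val then
    isWallOnes (PySem.Int.floordiv val 2) (if PySem.Int.mod val 2 == 1 then ones + 1 else ones)
  else ones
termination_by val.toNat
decreasing_by
  rw [PySem.Int.floordiv_eq_ediv_of_pos (by norm_num)]
  omega

def is_wall (x : Int) (y : Int) : Bool :=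
  let val := x * x + 3 * x + 2 * x * y + y + y * y + 1358
  let ones := isWallOnes val 0
  PySem.Int.mod ones 2 == 1

-- ===== PORT B =====
-- Source B's `while s < val.bit_length(): val ^= val >> s; s *= 2` loop; val > 0 at entry, so it is
-- tracked as a Nat (Nat.size is exactly Python's bit_length on nonnegative ints)
def isWallFold (v : Nat) (s : Nat) : Nat :=
  if s < Nat.size v then isWallFold (v ^^^ (v >>> s)) (2 * s) else v
termination_by Nat.size v + 2 - s
decreasing_by
  rename_i h
  have hle : Nat.size (v ^^^ (v >>> s)) ≤ Nat.size v :=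
    Nat.size_le.mpr (Nat.xor_lt_two_pow (Nat.lt_size_self v)
      (Nat.lt_of_le_of_lt (Nat.shiftRight_le v s) (Nat.lt_size_self v)))
  rcases Nat.eq_zero_or_pos s with hs | hs
  · subst hs
    simp only [Nat.shiftRight_zero, Nat.xor_self, Nat.size_zero]
    omega
  · omega

def is_wall_alt (x : Int) (y : Int) : Bool :=
  let val := x * x + 3 * x + 2 * x * y + y + y * y + 1358
  if val ≤ 0 then false
  else (isWallFold val.toNat 1) &&& 1 == 1

-- ===== PRECONDITION & SPEC =====
def Spec_is_wall (x : Int) (y : Int) (out : Bool) : Prop := out = is_wall_alt x y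
instance (x : Int) (y : Int) (out : Bool) : Decidable (Spec_is_wall x y out) := by unfold Spec_is_wall; infer_instance

-- ===== CLAIM (what is proved, stated in full; the proofs are below) =====
def Claim_equal_is_wall : Prop := ∀ (x : Int) (y : Int), Dom_is_wall x y → Spec_is_wall x y (is_wall x y)

-- ===== LEMMAS AND PROOFS =====

-- popcount of a natural number (proof-side reference definition)
def pvPc (n : Nat) : Nat :=
  if n = 0 then 0 else n % 2 + pvPc (n / 2)
decreasing_by omega

-- strided bit-parity: XOR of the bits of v at positions that are multiples of (k+1)
def pvSp (k v : Nat) : Bool :=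
  if v = 0 then false else ((v % 2 == 1) ^^ pvSp k (v >>> (k + 1)))
termination_by v
decreasing_by
  rename_i h
  rw [Nat.shiftRight_eq_div_pow]
  exact Nat.div_lt_self (Nat.pos_of_ne_zero h) (Nat.one_lt_two_pow (by omega))

theorem pvSp_zero (k : Nat) : pvSp k 0 = false := by
  rw [pvSp]; simp

theorem pvSp_pos (k v : Nat) (hv : v ≠ 0) :
    pvSp k v = ((v % 2 == 1) ^^ pvSp k (v >>> (k + 1))) := by
  rw [pvSp, if_neg hv]

theorem pvPc_zero : pvPc 0 = 0 := by
  rw [pvPc]; simp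

theorem pvPc_pos (n : Nat) (hn : n ≠ 0) : pvPc n = n % 2 + pvPc (n / 2) := by
  rw [pvPc, if_neg hn]

theorem pvBit0 (a : Nat) : (a % 2 == 1) = a.testBit 0 := by
  by_cases h : a % 2 = 1 <;> simp [h, Nat.testBit_zero]

theorem pvXorBit (v w : Nat) :
    ((v ^^^ w) % 2 == 1) = ((v % 2 == 1) ^^ (w % 2 == 1)) := by
  rw [pvBit0, pvBit0, pvBit0, Nat.testBit_xor]

-- A's loop accumulates popcount (fuel n bounds val.toNat)
theorem isWallOnes_eq : ∀ (n : Nat) (val ones : Int), val.toNat ≤ n →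
    isWallOnes val ones = ones + (pvPc val.toNat : Int) := by
  intro n
  induction n with
  | zero =>
    intro val ones h
    rw [isWallOnes, if_neg (by omega : ¬ 0 < val),
      show val.toNat = 0 from by omega, pvPc_zero]
    simp
  | succ n ih =>
    intro val ones h
    by_cases hv : 0 < val
    · rw [isWallOnes, if_pos hv,
        PySem.Int.floordiv_eq_ediv_of_pos (by norm_num),
        PySem.Int.mod_eq_emod_of_pos (by norm_num)]
      rw [ih (val / 2) _ (by omega)]
      rw [pvPc_pos val.toNat (by omega),
        show (val / 2).toNat = val.toNat / 2 from by omega]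
      by_cases hp : val % 2 = 1
      · rw [if_pos (by simpa using hp), show val.toNat % 2 = 1 from by omega]
        push_cast; ring
      · rw [if_neg (by simpa using hp), show val.toNat % 2 = 0 from by omega]
        push_cast; ring
    · rw [isWallOnes, if_neg hv,
        show val.toNat = 0 from by omega, pvPc_zero]
      simp

-- one doubling step of the fold preserves the strided parity
theorem pvSp_step (k : Nat) : ∀ v : Nat, pvSp (2 * k + 1) (v ^^^ (v >>> (k + 1))) = pvSp k v := by
  intro v
  induction v using Nat.strong_induction_on with
  | _ v ih =>
    by_cases hv : v = 0
    · subst hv; simp [pvSp_zero]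
    · have hlt : v >>> (k + 1) < v := by
        rw [Nat.shiftRight_eq_div_pow]
        exact Nat.div_lt_self (Nat.pos_of_ne_zero hv) (Nat.one_lt_two_pow (by omega))
      have hw : v ^^^ (v >>> (k + 1)) ≠ 0 := by
        intro h0
        have := Nat.xor_eq_zero_iff.mp h0
        omega
      have hsh : ∀ a b : Nat, v >>> a >>> b = v >>> (a + b) := fun a b =>
        (Nat.shiftRight_add v a b).symm
      have hv2lt : v >>> (2 * (k + 1)) < v := by
        rw [Nat.shiftRight_eq_div_pow]
        exact Nat.div_lt_self (Nat.pos_of_ne_zero hv) (Nat.one_lt_two_pow (by omega))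
      rw [pvSp_pos (2 * k + 1) _ hw]
      have hshift : (v ^^^ (v >>> (k + 1))) >>> (2 * k + 1 + 1)
          = (v >>> (2 * (k + 1))) ^^^ ((v >>> (2 * (k + 1))) >>> (k + 1)) := by
        rw [Nat.shiftRight_xor_distrib, hsh, hsh,
          show 2 * k + 1 + 1 = 2 * (k + 1) from by omega,
          show k + 1 + 2 * (k + 1) = 2 * (k + 1) + (k + 1) from by omega, ← hsh]
      rw [hshift, ih _ hv2lt, pvXorBit]
      conv_rhs => rw [pvSp_pos k v hv]
      by_cases hv2 : v >>> (k + 1) = 0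
      · have hz : v >>> (2 * (k + 1)) = 0 := by
          rw [show 2 * (k + 1) = (k + 1) + (k + 1) from by omega, ← hsh, hv2]
          simp
        rw [hv2, hz, pvSp_zero]
        simp
      · conv_rhs => rw [pvSp_pos k (v >>> (k + 1)) hv2]
        rw [hsh, show k + 1 + (k + 1) = 2 * (k + 1) from by omega, Bool.xor_assoc]

-- stride 1 is popcount parity
theorem pvSp_one (v : Nat) : pvSp 0 v = decide (pvPc v % 2 = 1) := by
  induction v using Nat.strong_induction_on with
  | _ v ih =>
    by_cases hv : v = 0
    · subst hv
      rw [pvSp_zero, pvPc_zero]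
      simp
    · rw [pvSp_pos 0 v hv,
        show v >>> (0 + 1) = v / 2 from by rw [Nat.shiftRight_eq_div_pow],
        ih (v / 2) (Nat.div_lt_self (Nat.pos_of_ne_zero hv) (by norm_num)),
        pvPc_pos v hv]
      rcases Nat.mod_two_eq_zero_or_one v with h | h <;>
        rcases Nat.mod_two_eq_zero_or_one (pvPc (v / 2)) with h2 | h2 <;>
        simp [h, Nat.add_mod, h2]

-- the stopped fold: low bit of v is the strided parity once s covers all bits
theorem pvFold_stop (v s : Nat) (hs : 1 ≤ s) (h : ¬ s < Nat.size v) :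
    ((v &&& 1 == 1)) = pvSp (s - 1) v := by
  have hvs : v >>> s = 0 := by
    rw [Nat.shiftRight_eq_div_pow]
    exact Nat.div_eq_of_lt (Nat.lt_of_lt_of_le (Nat.lt_size_self v)
      (Nat.pow_le_pow_right (by norm_num) (by omega)))
  by_cases hv : v = 0
  · subst hv; rw [pvSp_zero]; decide
  · rw [pvSp_pos (s - 1) v hv, show s - 1 + 1 = s from by omega, hvs, pvSp_zero,
      Nat.and_one_is_mod]
    simp

-- the fold's low bit is the strided parity (fuel n bounds the termination measure)
theorem isWallFold_bit : ∀ (n v s : Nat), 1 ≤ s → Nat.size v + 2 - s ≤ n →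
    ((isWallFold v s) &&& 1 == 1) = pvSp (s - 1) v := by
  intro n
  induction n with
  | zero =>
    intro v s hs hn
    rw [isWallFold, if_neg (by omega)]
    exact pvFold_stop v s hs (by omega)
  | succ n ih =>
    intro v s hs hn
    obtain ⟨t, rfl⟩ : ∃ t, s = t + 1 := ⟨s - 1, by omega⟩
    rw [isWallFold]
    by_cases h : t + 1 < Nat.size v
    · rw [if_pos h]
      have hle : Nat.size (v ^^^ (v >>> (t + 1))) ≤ Nat.size v :=
        Nat.size_le.mpr (Nat.xor_lt_two_pow (Nat.lt_size_self v)
          (Nat.lt_of_le_of_lt (Nat.shiftRight_le v (t + 1)) (Nat.lt_size_self v)))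
      rw [ih (v ^^^ (v >>> (t + 1))) (2 * (t + 1)) (by omega) (by omega),
        show 2 * (t + 1) - 1 = 2 * t + 1 from by omega,
        show t + 1 - 1 = t from by omega]
      exact pvSp_step t v
    · rw [if_neg h]
      exact pvFold_stop v (t + 1) hs h

-- ===== VERDICT (by name: the statement is the Claim_ definition above) =====
theorem is_wall_spec : Claim_equal_is_wall := by
  intro x y _
  unfold Spec_is_wall is_wall is_wall_alt
  set val := x * x + 3 * x + 2 * x * y + y + y * y + 1358 with hval
  show (PySem.Int.mod (isWallOnes val 0) 2 == 1)
      = (if val ≤ 0 then false else ((isWallFold val.toNat 1) &&& 1 == 1))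
  rw [isWallOnes_eq val.toNat val 0 (le_refl _)]
  by_cases h : val ≤ 0
  · rw [if_pos h, show val.toNat = 0 from by omega, pvPc_zero]
    decide
  · rw [if_neg h,
      isWallFold_bit (Nat.size val.toNat + 1) val.toNat 1 (le_refl 1) (by omega),
      show (1 : Nat) - 1 = 0 from rfl, pvSp_one,
      PySem.Int.mod_eq_emod_of_pos (by norm_num : (0 : Int) < 2), zero_add]
    rcases Nat.mod_two_eq_zero_or_one (pvPc val.toNat) with hp | hp
    · rw [show ((pvPc val.toNat : Int)) % 2 = 0 from by omega, hp]
      decide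
    · rw [show ((pvPc val.toNat : Int)) % 2 = 1 from by omega, hp]
      decide
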